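-- pv_equiv track=rewrite | github.com/LyanKaleu/IFPI-166-PYTHON | IFPI-SEM16-T2/Q3.py | contar_nascimentos
-- ===== SOURCE A (Python) =====
-- def contar_nascimentos(anos):
--     contagem_nascimentos = {}  # Dicionário para armazenar a contagem de nascimentos por ano
--
--     for ano in anos:  # Loop para cada ano na lista de anos de nascimento
--         if ano in contagem_nascimentos:  # Verifica se o ano já está presente na contagem
--             contagem_nascimentos[ano] += 1  # Incrementa a contagem de nascimentos para esse ano
--         else:
--             contagem_nascimentos[ano] = 1  # Adiciona o ano à contagem com contagem 1
--
--     return contagem_nascimentos  # Retorna o dicionário com a contagem de nascimentos por ano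
-- ===== SOURCE B (Python) =====
-- def contar_nascimentos(anos):
--     # Sort a copy and count each run of equal years in one pass, then emit the
--     # counts in first-occurrence order of the original list.
--     contagens = {}
--     atual = None
--     quantos = 0
--     for ano in sorted(anos):
--         if quantos > 0 and ano == atual:
--             quantos += 1
--         else:
--             if quantos > 0:
--                 contagens[atual] = quantos
--             atual = ano
--             quantos = 1
--     if quantos > 0:
--         contagens[atual] = quantos
--     return {ano: contagens[ano] for ano in dict.fromkeys(anos)}
-- ===== Notes on version B (the rewrite author's own statement) =====
-- stated objective: alternative
-- what changed: Replaced the hashed membership-test/increment loop by sort-then-group: sorted(anos) is scanned once counting runs of equal years, and the counts are emitted in first-occurrence order via dict.fromkeys.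
import Mathlib
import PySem

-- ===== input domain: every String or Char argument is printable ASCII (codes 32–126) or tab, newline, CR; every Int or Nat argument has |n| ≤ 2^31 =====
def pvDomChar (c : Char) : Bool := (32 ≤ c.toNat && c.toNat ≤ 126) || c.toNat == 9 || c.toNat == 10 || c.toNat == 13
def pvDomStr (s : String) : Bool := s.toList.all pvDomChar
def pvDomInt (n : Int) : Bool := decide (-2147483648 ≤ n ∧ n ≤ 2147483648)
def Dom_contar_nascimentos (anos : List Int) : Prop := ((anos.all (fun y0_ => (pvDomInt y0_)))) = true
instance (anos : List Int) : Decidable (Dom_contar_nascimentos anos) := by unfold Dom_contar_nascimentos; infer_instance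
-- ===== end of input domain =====

-- B replaces A's hashed membership-test/increment loop by sort-then-count-runs, emitting the
-- counts in first-occurrence key order; objective: alternative (sorting pass instead of a hashed pass).

-- ===== PORT A =====
def contar_nascimentos (anos : List Int) : List (Int × Int) :=
  (anos.foldl
    (fun d ano =>
      if d.contains ano then d.insert ano (d.getD ano 0 + 1)   -- contagem_nascimentos[ano] += 1
      else d.insert ano 1)                                     -- contagem_nascimentos[ano] = 1
    PySem.Dict.empty).items

-- ===== PORT B =====
-- loop state: (contagens, atual, quantos); atual is Option Int because Python starts it at None
-- (its value is only read under the guard quantos > 0, when it is always `some _`).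
def pvStep (s : PySem.Dict Int Int × Option Int × Int) (ano : Int) :
    PySem.Dict Int Int × Option Int × Int :=
  if s.2.2 > 0 ∧ some ano = s.2.1 then (s.1, s.2.1, s.2.2 + 1)
  else ((if s.2.2 > 0 then s.1.insert (s.2.1.getD 0) s.2.2 else s.1), some ano, 1)

-- the trailing 'if quantos > 0: contagens[atual] = quantos' after the loop
def pvFinish (s : PySem.Dict Int Int × Option Int × Int) : PySem.Dict Int Int :=
  if s.2.2 > 0 then s.1.insert (s.2.1.getD 0) s.2.2 else s.1

def contar_nascimentos_alt (anos : List Int) : List (Int × Int) :=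
  let contagens := pvFinish ((PySem.List.sorted anos (fun x => x) false).foldl pvStep
    (PySem.Dict.empty, none, 0))
  -- {ano: contagens[ano] for ano in dict.fromkeys(anos)}; contagens[ano] never misses
  -- (every ano of anos occurs in sorted(anos)), so the getD default is never read — exact.
  ((PySem.List.dedup anos).foldl (fun d ano => d.insert ano (contagens.getD ano 0))
    PySem.Dict.empty).items

-- ===== PRECONDITION & SPEC =====
def Spec_contar_nascimentos (anos : List Int) (out : List (Int × Int)) : Prop := out = contar_nascimentos_alt anos
instance (anos : List Int) (out : List (Int × Int)) : Decidable (Spec_contar_nascimentos anos out) := by unfold Spec_contar_nascimentos; infer_instance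

-- ===== CLAIM (what is proved, stated in full; the proofs are below) =====
def Claim_equal_contar_nascimentos : Prop := ∀ (anos : List Int), Dom_contar_nascimentos anos → Spec_contar_nascimentos anos (contar_nascimentos anos)

-- ===== LEMMAS AND PROOFS =====

-- A's branching loop is exactly the counter fold: when the key is absent, getD gives 0, so insert 1 = insert (getD+1).
lemma contarA_eq_counter (anos : List Int) :
    contar_nascimentos anos = (PySem.Dict.counter anos).items := by
  unfold contar_nascimentos
  have hfun : (fun (d : PySem.Dict Int Int) ano =>
      if d.contains ano then d.insert ano (d.getD ano 0 + 1) else d.insert ano 1)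
      = (fun d x => d.insert x (d.getD x 0 + 1)) := by
    funext d x
    by_cases h : d.contains x = true
    · simp [h]
    · have h' : d.contains x = false := by simpa using h
      rw [if_neg (by simp [h']), PySem.Dict.getD_of_not_contains d 0 h']
      norm_num
  rw [hfun, PySem.Dict.foldl_insert_getD_add_one_eq_counter]

-- Grouping a sorted tail s (all ≥ the current run value c, run length q so far) yields
-- a dict whose lookups are the run lengths, i.e. the element counts.
lemma runs_getD (s : List Int) : ∀ (d : PySem.Dict Int Int) (c q : Int), 1 ≤ q →
    s.Pairwise (· ≤ ·) → (∀ x ∈ s, c ≤ x) → ∀ v,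
    (pvFinish (s.foldl pvStep (d, some c, q))).getD v 0 =
      if v = c then q + (List.count c s : Int)
      else if v ∈ s then (List.count v s : Int) else d.getD v 0 := by
  induction s with
  | nil =>
    intro d c q hq _ _ v
    simp only [List.foldl_nil, pvFinish]
    rw [if_pos (by omega)]
    by_cases hv : v = c
    · subst hv; simp [PySem.Dict.getD_insert]
    · simp [PySem.Dict.getD_insert, hv]
  | cons a s ih =>
    intro d c q hq hpw hge v
    have hpw' : s.Pairwise (· ≤ ·) := hpw.of_cons
    have hax : ∀ x ∈ s, a ≤ x := fun x hx => (List.pairwise_cons.mp hpw).1 x hx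
    have hca : c ≤ a := hge a (by simp)
    by_cases hac : a = c
    · subst hac
      have hstep : pvStep (d, some a, q) a = (d, some a, q + 1) := by
        simp [pvStep]; omega
      rw [List.foldl_cons, hstep]
      rw [ih d a (q + 1) (by omega) hpw' hax v]
      by_cases hv : v = a
      · subst hv; simp [List.count_cons]; push_cast; ring
      · simp [hv, Ne.symm hv, List.mem_cons]
    · have hstep : pvStep (d, some c, q) a = (d.insert c q, some a, 1) := by
        simp only [pvStep]
        rw [if_neg (by simp [Ne.symm hac]; omega)]
        simp; omega
      have hcs : c ∉ s := by
        intro hmem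
        have h1 := hax c hmem
        exact hac (le_antisymm h1 hca)
      rw [List.foldl_cons, hstep]
      rw [ih (d.insert c q) a 1 (by omega) hpw' hax v]
      by_cases hv : v = c
      · subst hv
        rw [if_neg (fun h => hac h.symm), if_neg hcs, PySem.Dict.getD_insert, if_pos rfl,
          if_pos rfl]
        simp [List.count_cons, hac, List.count_eq_zero_of_not_mem hcs]
      · by_cases hva : v = a
        · subst hva
          rw [if_pos rfl, if_neg hv, if_pos (by simp)]
          simp [List.count_cons]; push_cast; ring
        · by_cases hvs : v ∈ s
          · have hav : ¬a = v := fun h => hva h.symm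
            simp [hvs, hva, hv, hav, List.count_cons, List.mem_cons]
          · simp [hvs, hva, hv, PySem.Dict.getD_insert, List.mem_cons]

-- B's grouped dict agrees with anos.count on every element of anos.
lemma contagens_getD (anos : List Int) (a : Int) (ha : a ∈ anos) :
    (pvFinish ((PySem.List.sorted anos (fun x => x) false).foldl pvStep
      (PySem.Dict.empty, none, 0))).getD a 0 = (List.count a anos : Int) := by
  have hperm : (PySem.List.sorted anos (fun x => x) false).Perm anos :=
    PySem.List.sorted_perm anos (fun x => x) false
  have hmem : a ∈ PySem.List.sorted anos (fun x => x) false := hperm.mem_iff.mpr ha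
  have hpw : (PySem.List.sorted anos (fun x => x) false).Pairwise (· ≤ ·) := by
    simpa using PySem.List.sorted_pairwise anos (fun x => x)
  have hcnt : List.count a (PySem.List.sorted anos (fun x => x) false) = List.count a anos :=
    hperm.count_eq a
  cases hs : PySem.List.sorted anos (fun x => x) false with
  | nil => rw [hs] at hmem; simp at hmem
  | cons m t =>
    rw [hs] at hmem hpw hcnt
    have hstep0 : pvStep (PySem.Dict.empty, none, 0) m = (PySem.Dict.empty, some m, 1) := by
      simp [pvStep]
    rw [List.foldl_cons, hstep0]
    rw [runs_getD t PySem.Dict.empty m 1 (by omega) hpw.of_cons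
      (fun x hx => (List.pairwise_cons.mp hpw).1 x hx) a]
    rw [← hcnt]
    by_cases hm : a = m
    · subst hm
      rw [if_pos rfl, List.count_cons_self]
      push_cast; ring
    · have hat : a ∈ t := by
        rcases List.mem_cons.mp hmem with h | h
        · exact absurd h hm
        · exact h
      rw [if_neg hm, if_pos hat]
      simp [List.count_cons, hm, Ne.symm hm]

lemma contarB_eq_counter (anos : List Int) :
    contar_nascimentos_alt anos = (PySem.Dict.counter anos).items := by
  unfold contar_nascimentos_alt
  rw [PySem.Dict.items_foldl_insert_fresh (PySem.List.dedup anos) (fun a => a)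
        (fun a => (pvFinish ((PySem.List.sorted anos (fun x => x) false).foldl pvStep
          (PySem.Dict.empty, none, 0))).getD a 0) PySem.Dict.empty
        (by intro a _; simp) (by simp [PySem.List.dedup_eq_ofList, PySem.Set.nodup_ofList])]
  rw [PySem.Dict.items_counter]
  have hnil : (PySem.Dict.empty : PySem.Dict Int Int).items = [] := rfl
  rw [hnil, List.nil_append, PySem.List.dedup_eq_ofList]
  refine List.map_congr_left (fun a ha => ?_)
  have haa : a ∈ anos := (PySem.Set.mem_ofList anos a).mp ha
  rw [contagens_getD anos a haa]

-- ===== VERDICT (by name: the statement is the Claim_ definition above) =====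
theorem contar_nascimentos_spec : Claim_equal_contar_nascimentos := by
  intro anos _
  unfold Spec_contar_nascimentos
  rw [contarA_eq_counter, contarB_eq_counter]
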